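-- pv_equiv track=rewrite | github.com/Ciaran-Whyte/adventOfCode2019 | x_day_4/day4b.py | has_two_digits
-- ===== SOURCE A (Python) =====
-- from collections import Counter
--
-- def has_two_digits(num):
--     num=str(num)
--     c = Counter(num)
--     if 2 in c.values():
--         for double_digits in [x[0] for x in c.items() if x[1] is 2]:
--             idx = num.index(double_digits)
--             if num[idx] and num[idx+1]:
--                 return True
--     return False
-- ===== SOURCE B (Python) =====
-- def has_two_digits(num):
--     run = 0
--     prev = None
--     for ch in sorted(str(num)):
--         if ch == prev:
--             run += 1
--         else:
--             if run == 2: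
--                 return True
--             prev = ch
--             run = 1
--     return run == 2
-- ===== Notes on version B (the rewrite author's own statement) =====
-- stated objective: alternative
-- what changed: Replaces the Counter hash-table plus index lookups with a sort of the digit string followed by a single scan of consecutive runs, returning True when a run of length exactly two is found.
import Mathlib
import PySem

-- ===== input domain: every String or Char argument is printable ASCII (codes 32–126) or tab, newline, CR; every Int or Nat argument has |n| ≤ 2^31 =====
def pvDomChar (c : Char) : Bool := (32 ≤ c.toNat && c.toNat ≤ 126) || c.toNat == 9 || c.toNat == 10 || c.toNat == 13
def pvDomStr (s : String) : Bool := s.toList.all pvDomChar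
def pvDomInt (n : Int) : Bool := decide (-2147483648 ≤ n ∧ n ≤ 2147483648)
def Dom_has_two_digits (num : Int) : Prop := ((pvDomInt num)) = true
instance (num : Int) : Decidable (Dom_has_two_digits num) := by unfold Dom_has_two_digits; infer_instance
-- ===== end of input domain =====

-- B replaces A's Counter-and-index-lookup with a sort of str(num) followed by one scan of consecutive runs (alternative decomposition, same result).

-- ===== PORT A =====
def has_two_digits (num : Int) : Bool :=
  let s := PySem.Int.toChars num                     -- num = str(num)
  let c := PySem.Dict.counter s                      -- c = Counter(num)
  if (PySem.Dict.values c).contains (2 : Int) then   -- if 2 in c.values():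
    -- for double_digits in [x[0] for x in c.items() if x[1] is 2]:
    (((PySem.Dict.items c).filter (fun x => x.2 == 2)).map Prod.fst).any (fun d =>
      match PySem.List.index? s d with               -- idx = num.index(double_digits)
      | some idx =>
        -- if num[idx] and num[idx+1]: return True   (one-char strings are truthy;
        -- num[idx+1] would raise IndexError out of range — exact: none stays false below)
        match PySem.List.pyGet? s ((idx : Int) + 1) with
        | some _ => true
        | none => false
      | none => false)                               -- ValueError from .index (d ∈ s, so unreachable)
  else false

-- ===== PORT B =====
-- scan the characters in sorted order, maintaining the previous char and its run length
def altScan : List Char → Option Char → Int → Bool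
  | [], _, run => run == 2
  | ch :: rest, prev, run =>
    if some ch == prev then altScan rest prev (run + 1)
    else if run == 2 then true
    else altScan rest (some ch) 1

def has_two_digits_alt (num : Int) : Bool :=
  altScan (PySem.List.sorted (PySem.Int.toChars num) (fun c => c) false) none 0

-- ===== PRECONDITION & SPEC =====
def Spec_has_two_digits (num : Int) (out : Bool) : Prop := out = has_two_digits_alt num
instance (num : Int) (out : Bool) : Decidable (Spec_has_two_digits num out) := by unfold Spec_has_two_digits; infer_instance

-- ===== CLAIM (what is proved, stated in full; the proofs are below) =====
def Claim_equal_has_two_digits : Prop := ∀ (num : Int), Dom_has_two_digits num → Spec_has_two_digits num (has_two_digits num)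

-- ===== LEMMAS AND PROOFS =====

-- a character counted exactly twice passes A's inner index check
lemma inner_check (s : List Char) (d : Char) (hcnt : s.count d = 2) :
    (match PySem.List.index? s d with
      | some idx =>
        match PySem.List.pyGet? s ((idx : Int) + 1) with
        | some _ => true
        | none => false
      | none => false) = true := by
  have hmem : d ∈ s := List.count_pos_iff.mp (by omega)
  obtain ⟨idx, hidx⟩ := Option.isSome_iff_exists.mp ((PySem.List.index?_isSome_iff s d).mpr hmem)
  obtain ⟨pre, suf, hseq, hlen, hpre⟩ := (PySem.List.index?_eq_some_iff s d idx).mp hidx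
  have hc0 : pre.count d = 0 := List.count_eq_zero.mpr hpre
  have hsuf : suf.count d = 1 := by
    rw [hseq] at hcnt
    simp [List.count_append, hc0] at hcnt
    omega
  have hsne : suf ≠ [] := by
    intro h; rw [h] at hsuf; simp at hsuf
  have hlt : idx + 1 < s.length := by
    rw [hseq]
    simp [List.length_append]
    have := List.length_pos_iff.mpr hsne
    omega
  rw [hidx]
  simp only []
  have hget : PySem.List.pyGet? s ((idx : Int) + 1) = s[idx+1]? := by
    rw [show ((idx : Int) + 1) = ((idx + 1 : Nat) : Int) by push_cast; ring]
    exact PySem.List.pyGet?_natCast s (idx+1)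
  simp only [hget, List.getElem?_eq_getElem hlt]

-- A returns true iff some character of str(num) occurs exactly twice
lemma portA_eq_exists (num : Int) :
    has_two_digits num =
      decide (∃ ch ∈ PySem.Int.toChars num, (PySem.Int.toChars num).count ch = 2) := by
  unfold has_two_digits
  set s := PySem.Int.toChars num with hs
  simp only [PySem.Dict.values, PySem.Dict.items_counter]
  by_cases hex : ∃ ch ∈ s, s.count ch = 2
  · obtain ⟨ch, hmem, hcnt⟩ := hex
    have hmem' : ch ∈ PySem.Set.ofList s := (PySem.Set.mem_ofList s ch).mpr hmem
    have hpair : (ch, (s.count ch : Int)) ∈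
        (PySem.Set.ofList s : List Char).map (fun k => (k, (s.count k : Int))) :=
      List.mem_map_of_mem hmem'
    have hcond : (((PySem.Set.ofList s : List Char).map
        (fun k => (k, (s.count k : Int)))).map Prod.snd).contains (2 : Int) = true := by
      rw [List.contains_eq_mem, decide_eq_true_eq, List.mem_map]
      exact ⟨(ch, (s.count ch : Int)), hpair, by simp [hcnt]⟩
    rw [if_pos hcond]
    have hfilt : (ch, (s.count ch : Int)) ∈
        ((PySem.Set.ofList s : List Char).map (fun k => (k, (s.count k : Int)))).filter
          (fun x => x.2 == 2) :=
      List.mem_filter.mpr ⟨hpair, by simp [hcnt]⟩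
    have hany : ((((PySem.Set.ofList s : List Char).map
          (fun k => (k, (s.count k : Int)))).filter (fun x => x.2 == 2)).map Prod.fst).any
        (fun d =>
          match PySem.List.index? s d with
          | some idx =>
            match PySem.List.pyGet? s ((idx : Int) + 1) with
            | some _ => true
            | none => false
          | none => false) = true := by
      rw [List.any_eq_true]
      exact ⟨ch, List.mem_map_of_mem (f := Prod.fst) hfilt, inner_check s ch hcnt⟩
    rw [hany]
    exact (decide_eq_true ⟨ch, hmem, hcnt⟩).symm
  · have hcond : (((PySem.Set.ofList s : List Char).map
        (fun k => (k, (s.count k : Int)))).map Prod.snd).contains (2 : Int) = false := by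
      rw [List.contains_eq_mem, decide_eq_false_iff_not]
      intro hmem2
      rw [List.mem_map] at hmem2
      obtain ⟨p, hp, hp2⟩ := hmem2
      rw [List.mem_map] at hp
      obtain ⟨k, hk, rfl⟩ := hp
      simp only at hp2
      apply hex
      refine ⟨k, (PySem.Set.mem_ofList s k).mp hk, ?_⟩
      omega
    rw [if_neg (by rw [hcond]; exact Bool.false_ne_true)]
    exact (decide_eq_false hex).symm

-- the run scan on a sorted tail, entered mid-run: true iff the current run finishes at 2
-- or some later character has count exactly 2
lemma altScan_spec (l : List Char) (p : Char) (run : Int)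
    (hs : l.Pairwise (· ≤ ·)) (hge : ∀ x ∈ l, p ≤ x) :
    altScan l (some p) run =
      decide (run + (l.count p : Int) = 2 ∨ ∃ ch ∈ l, ch ≠ p ∧ l.count ch = 2) := by
  induction l generalizing p run with
  | nil => by_cases h : run = 2 <;> simp [altScan, h]
  | cons ch rest ih =>
    rw [List.pairwise_cons] at hs
    obtain ⟨hch, hrest⟩ := hs
    by_cases h : ch = p
    · subst h
      simp only [altScan, beq_self_eq_true, if_true]
      rw [ih ch (run + 1) hrest hch]
      rw [decide_eq_decide]
      constructor
      · rintro (h1 | ⟨c, hc, hne, hcnt⟩)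
        · left; rw [List.count_cons_self]; push_cast at h1 ⊢; omega
        · right
          refine ⟨c, List.mem_cons_of_mem _ hc, hne, ?_⟩
          simp [Ne.symm hne]; exact hcnt
      · rintro (h1 | ⟨c, hc, hne, hcnt⟩)
        · left; rw [List.count_cons_self] at h1; push_cast at h1 ⊢; omega
        · right
          rcases List.mem_cons.mp hc with rfl | hc'
          · exact absurd rfl hne
          · refine ⟨c, hc', hne, ?_⟩
            simpa [Ne.symm hne] using hcnt
    · have hlt : p < ch := lt_of_le_of_ne (hge ch (List.mem_cons_self)) (Ne.symm h)
      have hnot : (ch :: rest).count p = 0 := by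
        rw [List.count_eq_zero]
        intro hmem
        rcases List.mem_cons.mp hmem with rfl | hm
        · exact absurd rfl (ne_of_lt hlt)
        · exact absurd (hch p hm) (not_le.mpr hlt)
      have hbeq : (some ch == some p) = false := by simp [h]
      simp only [altScan, hbeq, Bool.false_eq_true, if_false]
      by_cases hr : run = 2
      · simp [hr, hnot]
      · have hrb : (run == 2) = false := by simp [hr]
        simp only [hrb, Bool.false_eq_true, if_false]
        rw [ih ch 1 hrest (fun x hx => hch x hx)]
        rw [decide_eq_decide]
        rw [hnot]
        constructor
        · rintro (h1 | ⟨c, hc, hne, hcnt⟩)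
          · right
            refine ⟨ch, List.mem_cons_self, Ne.symm (ne_of_lt hlt), ?_⟩
            rw [List.count_cons_self]; omega
          · right
            have hpc : p < c := lt_of_lt_of_le hlt (hch c hc)
            refine ⟨c, List.mem_cons_of_mem _ hc, Ne.symm (ne_of_lt hpc), ?_⟩
            simp [Ne.symm hne]; exact hcnt
        · rintro (h1 | ⟨c, hc, hne, hcnt⟩)
          · simp at h1; omega
          · rcases List.mem_cons.mp hc with rfl | hc'
            · left; rw [List.count_cons_self] at hcnt; omega
            · by_cases hcc : c = ch
              · subst hcc; left; rw [List.count_cons_self] at hcnt; omega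
              · right
                refine ⟨c, hc', hcc, ?_⟩
                simpa [Ne.symm hcc] using hcnt

-- the full scan on a sorted list: true iff some character has count exactly 2
lemma altScan_run (t : List Char) (hpw : t.Pairwise (· ≤ ·)) :
    altScan t none 0 = decide (∃ ch ∈ t, t.count ch = 2) := by
  cases t with
  | nil => simp [altScan]
  | cons c rest =>
    rw [List.pairwise_cons] at hpw
    have h0 : altScan (c :: rest) none 0 = altScan rest (some c) 1 := by
      simp [altScan]
    rw [h0, altScan_spec rest c 1 hpw.2 hpw.1, decide_eq_decide]
    constructor
    · rintro (h1 | ⟨d, hd, hne, hcnt⟩)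
      · exact ⟨c, List.mem_cons_self, by simp [List.count_cons]; omega⟩
      · exact ⟨d, List.mem_cons_of_mem _ hd, by simp [Ne.symm hne]; exact hcnt⟩
    · rintro ⟨d, hd, hcnt⟩
      rcases List.mem_cons.mp hd with rfl | hd'
      · left; simp [List.count_cons] at hcnt; omega
      · by_cases hdc : d = c
        · subst hdc; left; simp [List.count_cons] at hcnt; omega
        · right; exact ⟨d, hd', hdc, by simpa [Ne.symm hdc] using hcnt⟩

-- B returns true iff some character of str(num) occurs exactly twice
lemma portB_eq_exists (num : Int) :
    has_two_digits_alt num =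
      decide (∃ ch ∈ PySem.Int.toChars num, (PySem.Int.toChars num).count ch = 2) := by
  unfold has_two_digits_alt
  set xs := PySem.Int.toChars num with hxs
  have hperm := PySem.List.sorted_perm xs (fun c => c) false
  rw [altScan_run _ (PySem.List.sorted_pairwise xs (fun c => c)), decide_eq_decide]
  constructor
  · rintro ⟨c, hc, hcnt⟩
    exact ⟨c, hperm.mem_iff.mp hc, by rw [← hperm.count_eq]; exact hcnt⟩
  · rintro ⟨c, hc, hcnt⟩
    exact ⟨c, hperm.mem_iff.mpr hc, by rw [hperm.count_eq]; exact hcnt⟩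

-- ===== VERDICT (by name: the statement is the Claim_ definition above) =====
theorem has_two_digits_spec : Claim_equal_has_two_digits := by
  intro num _
  unfold Spec_has_two_digits
  rw [portA_eq_exists, portB_eq_exists]
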